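-- pv_equiv track=rewrite | github.com/linhdvu14/cp-sols | sols/CodeForces/1869_d2/C_Fill_in_the_Matrix.py | solve
-- ===== SOURCE A (Python) =====
-- def solve(R, C):
--     if C == 1: return 0, [[0]] * R
--
--     m = min(R + 1, C)
--     grid = []
--     for i in range(R):
--         row = list(range(C))
--         if i + 1 < m: row[:m] = row[:m][i:] + row[:m][:i]
--         grid.append(row)
--
--     return m, grid
-- ===== SOURCE B (Python) =====
-- def solve(R, C):
--     if C == 1: return 0, [[0]] * R
--
--     m = min(R + 1, C)
--     grid = []
--     if R > 0:
--         head, tail = list(range(m)), list(range(m, C))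
--         for i in range(R):
--             grid.append(head + tail)
--             head = head[1:] + head[:1] if i + 2 < m else list(range(m))
--     return m, grid
-- ===== Notes on version B (the rewrite author's own statement) =====
-- stated objective: alternative
-- what changed: B builds the matrix incrementally with a running head: each row is emitted as head+tail and the head is then rotated one step (head[1:]+head[:1]) or reset to range(m) once rotation stops, instead of A's per-row independent reconstruction of range(C) by four-slice reassembly.
import Mathlib
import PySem

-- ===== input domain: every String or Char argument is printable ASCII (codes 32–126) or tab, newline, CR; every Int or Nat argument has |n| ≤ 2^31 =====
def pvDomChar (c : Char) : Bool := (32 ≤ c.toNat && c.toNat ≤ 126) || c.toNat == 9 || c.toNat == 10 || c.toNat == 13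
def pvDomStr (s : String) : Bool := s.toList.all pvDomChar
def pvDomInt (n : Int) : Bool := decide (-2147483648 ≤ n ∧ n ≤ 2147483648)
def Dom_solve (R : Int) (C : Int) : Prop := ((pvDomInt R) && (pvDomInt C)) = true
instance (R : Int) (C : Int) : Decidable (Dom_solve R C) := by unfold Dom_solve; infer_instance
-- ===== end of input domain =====

-- B generates the matrix incrementally: a running head is rotated one step per row and reset
-- to range(m) once rotation stops, instead of A's per-row slice reassembly of range(C); objective: alternative.

-- ===== PORT A =====
def solve (R : Int) (C : Int) : Int × List (List Int) :=
  if C == 1 then (0, List.replicate R.toNat ([0] : List Int)) else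
  let m := min (R + 1) C
  let grid := (PySem.List.pyRange 0 R 1).foldl (fun g i =>
    let row := PySem.List.pyRange 0 C 1
    let row := if i + 1 < m then
        (PySem.List.slice (PySem.List.slice row none (some m)) (some i) none ++
         PySem.List.slice (PySem.List.slice row none (some m)) none (some i)) ++
        PySem.List.slice row (some m) none
      else row
    g ++ [row]) []
  (m, grid)

-- ===== PORT B =====
def solve_alt (R : Int) (C : Int) : Int × List (List Int) :=
  if C == 1 then (0, List.replicate R.toNat ([0] : List Int)) else
  let m := min (R + 1) C
  let grid :=
    if 0 < R then
      let tail := PySem.List.pyRange m C 1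
      ((PySem.List.pyRange 0 R 1).foldl
        (fun (s : List (List Int) × List Int) i =>
          (s.1 ++ [s.2 ++ tail],
           if i + 2 < m then
             PySem.List.slice s.2 (some 1) none ++ PySem.List.slice s.2 none (some 1)
           else PySem.List.pyRange 0 m 1))
        ([], PySem.List.pyRange 0 m 1)).1
    else []
  (m, grid)

-- ===== PRECONDITION & SPEC =====
def Spec_solve (R : Int) (C : Int) (out : Int × List (List Int)) : Prop := out = solve_alt R C
instance (R : Int) (C : Int) (out : Int × List (List Int)) : Decidable (Spec_solve R C out) := by unfold Spec_solve; infer_instance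

-- ===== CLAIM (what is proved, stated in full; the proofs are below) =====
def Claim_equal_solve : Prop := ∀ (R : Int) (C : Int), Dom_solve R C → Spec_solve R C (solve R C)

-- ===== LEMMAS AND PROOFS =====

-- the head of row i: rotated prefix while i+1 < m, identity afterwards
def rowHead (m i : Int) : List Int :=
  if i + 1 < m then
    (PySem.List.pyRange 0 m 1).drop i.toNat ++ (PySem.List.pyRange 0 m 1).take i.toNat
  else PySem.List.pyRange 0 m 1

theorem foldl_append_map {α β : Type} (f : α → β) :
    ∀ (l : List α) (acc : List β),
      l.foldl (fun g i => g ++ [f i]) acc = acc ++ l.map f := by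
  intro l
  induction l with
  | nil => intro acc; simp
  | cons x xs ih => intro acc; simp [List.foldl_cons, ih]

theorem take_pyRange (m C : Int) (h0 : 0 ≤ m) (h1 : m ≤ C) :
    (PySem.List.pyRange 0 C 1).take m.toNat = PySem.List.pyRange 0 m 1 := by
  rw [PySem.List.pyRange_one_append 0 m C h0 h1]
  rw [List.take_append_of_le_length (by simp [PySem.List.length_pyRange_one])]
  simp [PySem.List.length_pyRange_one]

theorem drop_pyRange (m C : Int) (h0 : 0 ≤ m) (h1 : m ≤ C) :
    (PySem.List.pyRange 0 C 1).drop m.toNat = PySem.List.pyRange m C 1 := by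
  rw [PySem.List.pyRange_one_append 0 m C h0 h1]
  rw [List.drop_append_of_le_length (by simp [PySem.List.length_pyRange_one])]
  simp [PySem.List.length_pyRange_one]

-- rotating a rotation-by-n one more step gives the rotation-by-(n+1)
theorem rot_step {α : Type} (L : List α) (n : Nat) (hn : n < L.length) :
    (L.drop n ++ L.take n).drop 1 ++ (L.drop n ++ L.take n).take 1 =
      L.drop (n + 1) ++ L.take (n + 1) := by
  have hd : L.drop n = L[n] :: L.drop (n + 1) := List.drop_eq_getElem_cons hn
  have ht : L.take (n + 1) = L.take n ++ [L[n]] := by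
    rw [List.take_add_one, List.getElem?_eq_getElem hn]; rfl
  rw [hd, ht]
  simp only [List.cons_append, List.drop_succ_cons, List.drop_zero,
    List.take_succ_cons, List.take_zero, List.append_assoc]

-- the B-side head update carries rowHead m i to rowHead m (i+1)
theorem head_step (m i : Int) (hi : 0 ≤ i) :
    (if i + 2 < m then
       PySem.List.slice (rowHead m i) (some 1) none ++
       PySem.List.slice (rowHead m i) none (some 1)
     else PySem.List.pyRange 0 m 1) = rowHead m (i + 1) := by
  by_cases h : i + 2 < m
  · rw [if_pos h]
    have h1 : i + 1 < m := by omega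
    rw [rowHead, if_pos h1, rowHead, if_pos (show i + 1 + 1 < m by omega)]
    rw [PySem.List.slice_from _ (by omega : (0:Int) ≤ 1),
        PySem.List.slice_to _ (by omega : (0:Int) ≤ 1)]
    have hlen : i.toNat < (PySem.List.pyRange 0 m 1).length := by
      rw [PySem.List.length_pyRange_one]; omega
    have := rot_step (PySem.List.pyRange 0 m 1) i.toNat hlen
    simp only [Int.toNat_one] at *
    rw [this]
    congr 1 <;> · congr 1; omega
  · rw [if_neg h, rowHead, if_neg (show ¬ i + 1 + 1 < m by omega)]

-- loop invariant for B's fold: starting from head rowHead m i it emits rows rowHead m k ++ tail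
theorem loop_char (m : Int) (tail : List Int) (R : Int) :
    ∀ (n : Nat) (i : Int) (g : List (List Int)), 0 ≤ i → (R - i).toNat = n →
    ((PySem.List.pyRange i R 1).foldl
      (fun (s : List (List Int) × List Int) k =>
        (s.1 ++ [s.2 ++ tail],
         if k + 2 < m then
           PySem.List.slice s.2 (some 1) none ++ PySem.List.slice s.2 none (some 1)
         else PySem.List.pyRange 0 m 1))
      (g, rowHead m i)).1
    = g ++ (PySem.List.pyRange i R 1).map (fun k => rowHead m k ++ tail) := by
  intro n
  induction n with
  | zero =>
    intro i g hi hn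
    rw [PySem.List.pyRange_one_eq_nil (by omega : R ≤ i)]
    simp
  | succ n ih =>
    intro i g hi hn
    have hiR : i < R := by omega
    rw [PySem.List.pyRange_one_cons hiR]
    simp only [List.foldl_cons, List.map_cons]
    rw [head_step m i hi]
    rw [ih (i + 1) (g ++ [rowHead m i ++ tail]) (by omega) (by omega)]
    simp

theorem rowHead_zero (m : Int) : rowHead m 0 = PySem.List.pyRange 0 m 1 := by
  rw [rowHead]; split <;> simp

theorem solve_eq (R C : Int) : solve R C = solve_alt R C := by
  unfold solve solve_alt
  by_cases hC : C == 1
  · simp [hC]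
  · rw [if_neg hC, if_neg hC]
    set m := min (R + 1) C with hm
    refine Prod.ext rfl ?_
    dsimp only
    rw [foldl_append_map, List.nil_append]
    by_cases hR : 0 < R
    case neg =>
      rw [if_neg hR, PySem.List.pyRange_one_eq_nil (by omega : R ≤ 0)]
      simp
    rw [if_pos hR]
    have hloop := loop_char m (PySem.List.pyRange m C 1) R (R - 0).toNat 0 [] le_rfl rfl
    rw [rowHead_zero] at hloop
    rw [hloop, List.nil_append]
    apply List.map_congr_left
    intro i hi
    rw [PySem.List.mem_pyRange_one] at hi
    have hmC : m ≤ C := by omega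
    by_cases hrot : i + 1 < m
    · -- rotated row: m ≥ 2 here, so 0 ≤ m ≤ C
      have hm0 : (0:Int) ≤ m := by omega
      rw [if_pos hrot, rowHead, if_pos hrot]
      rw [PySem.List.slice_to _ hm0, PySem.List.slice_from _ hi.1,
          PySem.List.slice_to _ hi.1, PySem.List.slice_from _ hm0]
      rw [take_pyRange m C hm0 hmC, drop_pyRange m C hm0 hmC]
    · rw [if_neg hrot, rowHead, if_neg hrot]
      by_cases hm0 : (0:Int) ≤ m
      · exact PySem.List.pyRange_one_append 0 m C hm0 hmC
      · -- m < 0: then C = m < 0, all three ranges are empty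
        have hCm : m = C := by omega
        rw [PySem.List.pyRange_one_eq_nil (by omega : C ≤ 0),
            PySem.List.pyRange_one_eq_nil (by omega : m ≤ 0),
            PySem.List.pyRange_one_eq_nil (by omega : C ≤ m)]
        rfl

-- ===== VERDICT (by name: the statement is the Claim_ definition above) =====
theorem solve_spec : Claim_equal_solve := by
  intro R C _
  unfold Spec_solve
  exact solve_eq R C
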